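-- pv_equiv track=rewrite | github.com/BOLTB0X/PS | Programmers/문자열 나누기.py | solution
-- ===== SOURCE A (Python) =====
-- def string_slide(s):
--     x1, x2 = 0, 0
--
--     for idx, ch in enumerate(s):
--         if ch == s[0]:
--             x1 += 1
--         else:
--             x2 += 1
--
--         if x1 == x2:
--             return s[idx + 1 :]
--
--     return ""
--
-- def solution(s):
--     # 내 풀이
--     answer = 0
--     flag = 0
--
--     while s:
--         # x1이 x x2가 x가 아닌
--         x1 , x2 = 1, 0
--         # 문자열이 하나 남는다면
--         if len(s) == 1 or len(s) == 0 or flag == 1: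
--             answer += 1
--             break;
--
--         for i in range(1, len(s)):
--             if s[i] == s[0]:
--                 x1 += 1
--             else:
--                 x2 += 1
--             # 두 카운트가 같다면
--             if x1 == x2:
--                 s = s[i + 1:]
--                 answer += 1;
--                 break;
--
--             elif i == len(s) - 1 and x1 != x2:
--                 flag = 1
--                 break
--
--     # 다른 사람 풀이 참고
--     answer = 0
--
--     while s:
--         ret = string_slide(s)
--         answer += 1
--
--         if not ret:
--             break
--
--     return answer
-- ===== SOURCE B (Python) =====
-- def solution(s):
--     d = 0
--     first = None
--     for ch in s:
--         if d == 0: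
--             first = ch
--         d += 1 if ch == first else -1
--     return 0 if d == 0 else 1
-- ===== Notes on version B (the rewrite author's own statement) =====
-- stated objective: faster
-- what changed: A repeatedly slices the string group by group (and then re-scans the leftover with string_slide); B makes one pass keeping a running count difference that resets at each group boundary, returning 0 iff the pass ends balanced, with no slicing or second scan.
import Mathlib
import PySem

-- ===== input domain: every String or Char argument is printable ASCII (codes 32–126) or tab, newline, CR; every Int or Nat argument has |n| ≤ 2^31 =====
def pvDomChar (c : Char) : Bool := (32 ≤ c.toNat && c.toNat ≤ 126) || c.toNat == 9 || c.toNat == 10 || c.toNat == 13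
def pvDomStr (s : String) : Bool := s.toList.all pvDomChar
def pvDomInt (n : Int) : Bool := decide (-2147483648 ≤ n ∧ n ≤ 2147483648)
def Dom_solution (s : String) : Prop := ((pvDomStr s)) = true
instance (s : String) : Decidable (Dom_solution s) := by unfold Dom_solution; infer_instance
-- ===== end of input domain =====

-- B replaces A's repeated slicing with one pass keeping a running count difference; equal return values on all inputs.

-- ===== PORT A =====
-- the inner `for i in range(1, len(s))` of A's first while loop, scanning the tail
-- `rest` of s with s[0] = c0 and counts x1, x2 (called with 1, 0):
-- `some t` = a balance point was found and s becomes t (= s[i+1:]); `none` = the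
-- `elif i == len(s)-1 and x1 != x2` branch fired (flag = 1).
def aFor (c0 : Char) (rest : List Char) (x1 x2 : Int) : Option (List Char) :=
  match rest with
  | [] => none
  | ch :: t =>
    let x1 := if ch = c0 then x1 + 1 else x1
    let x2 := if ch = c0 then x2 else x2 + 1
    if x1 = x2 then some t else aFor c0 t x1 x2

-- a found balance point strictly shortens the string (used for aLoop1's termination)
theorem aFor_length (c0 : Char) : ∀ (rest : List Char) (x1 x2 : Int) (t : List Char),
    aFor c0 rest x1 x2 = some t → t.length < rest.length := by
  intro rest
  induction rest with
  | nil => intro _ _ _ h; simp [aFor] at h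
  | cons ch tl ih =>
    intro x1 x2 t h
    simp only [aFor] at h
    by_cases hc : ch = c0 <;> simp only [hc, if_true, if_false] at h <;>
      split at h
    · injection h with h; subst h; simp
    · exact Nat.lt_succ_of_lt (ih _ _ _ h)
    · injection h with h; subst h; simp
    · exact Nat.lt_succ_of_lt (ih _ _ _ h)

-- A's first while loop; it returns the final value of s (the loop's `answer` is dead:
-- A resets answer = 0 right after it).  Cases: s empty → while exits; len(s) == 1 →
-- break with s unchanged; balance point found → s = s[i+1:], continue; no balance
-- point → flag = 1, the loop comes round once more and the `flag == 1` branch breaks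
-- with s unchanged.
def aLoop1 (l : List Char) : List Char :=
  match l with
  | [] => []
  | [c] => [c]
  | c :: rest =>
    match h : aFor c rest 1 0 with
    | none => c :: rest
    | some t => aLoop1 t
termination_by l.length
decreasing_by
  have := aFor_length c rest 1 0 t h
  simp only [List.length_cons]
  omega

-- port of string_slide: enumerate s comparing each ch with s[0] (= c0), counts start
-- at 0, 0; returns s[idx+1:] at a balance point, "" if the loop finishes.
def slideAux (c0 : Char) (rest : List Char) (x1 x2 : Int) : List Char :=
  match rest with
  | [] => []
  | ch :: t =>
    let x1 := if ch = c0 then x1 + 1 else x1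
    let x2 := if ch = c0 then x2 else x2 + 1
    if x1 = x2 then t else slideAux c0 t x1 x2

def stringSlide (l : List Char) : List Char :=
  match l with
  | [] => []
  | c0 :: _ => slideAux c0 l 0 0

-- A's second while loop: its body never changes s, so Python either breaks during the
-- first iteration (s empty, or ret = string_slide(s) empty with answer = 1) or loops
-- forever; the fuel only makes that totality explicit — we prove below that for
-- s = aLoop1 …, string_slide(s) is always empty, so the recursive branch is
-- unreachable and the result is independent of the fuel.
def aLoop2 (fuel : Nat) (t : List Char) (answer : Int) : Int :=
  match fuel with
  | 0 => answer
  | fuel + 1 =>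
    if t = [] then answer
    else
      let ret := stringSlide t
      let answer := answer + 1
      if ret = [] then answer else aLoop2 fuel t answer

def solution (s : String) : Int :=
  let t := aLoop1 s.toList
  aLoop2 (t.length + 1) t 0

-- ===== PORT B =====
-- Source B: one pass; st.1 is d, the running (count of the current group's first char)
-- minus (count of the others); st.2 is `first`, the current group's first character
-- (`none` is Python's initial None; a fresh group starts exactly when d == 0).
def bStep (st : Int × Option Char) (ch : Char) : Int × Option Char :=
  let first := if st.1 = 0 then some ch else st.2
  (st.1 + (if some ch = first then 1 else -1), first)

def solution_alt (s : String) : Int :=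
  let d := (s.toList.foldl bStep (0, none)).1
  if d = 0 then 0 else 1

-- ===== PRECONDITION & SPEC =====
def Spec_solution (s : String) (out : Int) : Prop := out = solution_alt s
instance (s : String) (out : Int) : Decidable (Spec_solution s out) := by unfold Spec_solution; infer_instance

-- ===== CLAIM (what is proved, stated in full; the proofs are below) =====
def Claim_equal_solution : Prop := ∀ (s : String), Dom_solution s → Spec_solution s (solution s)

-- ===== LEMMAS AND PROOFS =====

-- one-step unfolding lemmas for the well-founded aLoop1
theorem aLoop1_eq_nil : aLoop1 [] = [] := by rw [aLoop1]

theorem aLoop1_eq_one (c : Char) : aLoop1 [c] = [c] := by rw [aLoop1]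

theorem aLoop1_cons_none (c r : Char) (rs : List Char) (hn : aFor c (r :: rs) 1 0 = none) :
    aLoop1 (c :: r :: rs) = c :: r :: rs := by
  rw [aLoop1]
  · split <;> simp_all
  · simp

theorem aLoop1_cons_some (c r : Char) (rs t : List Char) (hs : aFor c (r :: rs) 1 0 = some t) :
    aLoop1 (c :: r :: rs) = aLoop1 t := by
  rw [aLoop1]
  · split
    · simp_all
    · next t' h' =>
      injection hs.symm.trans h' with e
      rw [e]
  · simp

-- slideAux is aFor with the "no balance point" answer flattened to []
theorem slideAux_eq_aFor (c0 : Char) : ∀ (rest : List Char) (x1 x2 : Int),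
    slideAux c0 rest x1 x2 = (aFor c0 rest x1 x2).getD [] := by
  intro rest
  induction rest with
  | nil => intro x1 x2; simp [slideAux, aFor]
  | cons ch tl ih =>
    intro x1 x2
    simp only [slideAux, aFor]
    by_cases hc : ch = c0 <;> simp only [hc, if_true, if_false] <;>
      split <;> simp [ih]

-- a non-empty result of A's first loop is c :: rest with no balance point left in it
theorem aLoop1_shape : ∀ (l : List Char), aLoop1 l ≠ [] →
    ∃ c rest, aLoop1 l = c :: rest ∧ aFor c rest 1 0 = none := by
  intro l
  induction l using aLoop1.induct with
  | case1 => intro h; exact absurd aLoop1_eq_nil h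
  | case2 c => intro _; exact ⟨c, [], aLoop1_eq_one c, by simp [aFor]⟩
  | case3 c l' hne hn =>
    intro _
    cases l' with
    | nil => exact absurd rfl hne
    | cons r rs => exact ⟨c, r :: rs, aLoop1_cons_none c r rs hn, hn⟩
  | case4 c l' hne t hs ih =>
    intro hN
    cases l' with
    | nil => exact absurd rfl hne
    | cons r rs =>
      rw [aLoop1_cons_some c r rs t hs] at hN ⊢
      exact ih hN

-- string_slide of a non-empty result of the first loop is empty (so A's second loop
-- always breaks in its first iteration and returns 1 there)
theorem slide_aLoop1 (l : List Char) (h : aLoop1 l ≠ []) :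
    stringSlide (aLoop1 l) = [] := by
  obtain ⟨c, rest, he, hn⟩ := aLoop1_shape l h
  rw [he]
  have h1 : stringSlide (c :: rest) = slideAux c rest 1 0 := by
    simp [stringSlide, slideAux]
  rw [h1, slideAux_eq_aFor, hn]
  rfl

-- from a state with d = 0, B's fold does not depend on the stored first character
theorem bFold_zero (l : List Char) (f1 f2 : Option Char) (hne : l ≠ []) :
    l.foldl bStep (0, f1) = l.foldl bStep (0, f2) := by
  cases l with
  | nil => exact absurd rfl hne
  | cons c t => simp [List.foldl_cons, bStep]

-- inside a group headed by c with counts x1 ≠ x2, B's fold tracks aFor: it reaches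
-- state (0, some c) exactly at the balance point, and ends nonzero if there is none
theorem bFold_aFor (c : Char) : ∀ (rest : List Char) (x1 x2 : Int), x1 ≠ x2 →
    (∀ t, aFor c rest x1 x2 = some t →
        rest.foldl bStep (x1 - x2, some c) = t.foldl bStep (0, some c)) ∧
    (aFor c rest x1 x2 = none → (rest.foldl bStep (x1 - x2, some c)).1 ≠ 0) := by
  intro rest
  induction rest with
  | nil =>
    intro x1 x2 hne
    refine ⟨fun t h => by simp [aFor] at h, fun _ => ?_⟩
    simpa using sub_ne_zero_of_ne hne
  | cons ch tl ih =>
    intro x1 x2 hne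
    have hd : ¬ (x1 - x2 = 0) := sub_ne_zero_of_ne hne
    by_cases hcc : ch = c
    · subst hcc
      have hstep : List.foldl bStep (x1 - x2, some ch) (ch :: tl)
          = List.foldl bStep (x1 + 1 - x2, some ch) tl := by
        have e : x1 - x2 + 1 = x1 + 1 - x2 := by ring
        simp [List.foldl_cons, bStep, e]
      have haf : aFor ch (ch :: tl) x1 x2
          = if x1 + 1 = x2 then some tl else aFor ch tl (x1 + 1) x2 := by
        simp [aFor]
      by_cases he : x1 + 1 = x2
      · refine ⟨fun t ht => ?_, fun hn => ?_⟩
        · rw [haf, if_pos he] at ht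
          injection ht with e; subst e
          rw [hstep, he, sub_self]
        · rw [haf, if_pos he] at hn; cases hn
      · refine ⟨fun t ht => ?_, fun hn => ?_⟩
        · rw [haf, if_neg he] at ht
          rw [hstep]; exact (ih _ _ he).1 t ht
        · rw [haf, if_neg he] at hn
          rw [hstep]; exact (ih _ _ he).2 hn
    · have hstep : List.foldl bStep (x1 - x2, some c) (ch :: tl)
          = List.foldl bStep (x1 - (x2 + 1), some c) tl := by
        have e : x1 - x2 + (-1) = x1 - (x2 + 1) := by ring
        simp [List.foldl_cons, bStep, hd, hcc, e]
      have haf : aFor c (ch :: tl) x1 x2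
          = if x1 = x2 + 1 then some tl else aFor c tl x1 (x2 + 1) := by
        simp [aFor, hcc]
      by_cases he : x1 = x2 + 1
      · refine ⟨fun t ht => ?_, fun hn => ?_⟩
        · rw [haf, if_pos he] at ht
          injection ht with e; subst e
          rw [hstep, he, sub_self]
        · rw [haf, if_pos he] at hn; cases hn
      · refine ⟨fun t ht => ?_, fun hn => ?_⟩
        · rw [haf, if_neg he] at ht
          rw [hstep]; exact (ih _ _ he).1 t ht
        · rw [haf, if_neg he] at hn
          rw [hstep]; exact (ih _ _ he).2 hn

-- the two programs' conditions coincide: the first loop consumes all of s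
-- exactly when B's one-pass difference ends at 0
theorem loop1_empty_iff_balanced : ∀ (l : List Char),
    aLoop1 l = [] ↔ (l.foldl bStep (0, none)).1 = 0 := by
  intro l
  induction l using aLoop1.induct with
  | case1 => simp [aLoop1_eq_nil]
  | case2 c => simp [aLoop1_eq_one, List.foldl_cons, bStep]
  | case3 c l' hne hn =>
    cases l' with
    | nil => exact absurd rfl hne
    | cons r rs =>
      rw [aLoop1_cons_none c r rs hn]
      have hb := (bFold_aFor c (r :: rs) 1 0 (by norm_num)).2 hn
      rw [show ((1 : Int) - 0) = 1 by norm_num] at hb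
      have hsb : bStep (0, none) c = (1, some c) := by simp [bStep]
      rw [List.foldl_cons, hsb]
      exact iff_of_false (by simp) hb
  | case4 c l' hne t hs ih =>
    cases l' with
    | nil => exact absurd rfl hne
    | cons r rs =>
      rw [aLoop1_cons_some c r rs t hs, ih]
      have hb := (bFold_aFor c (r :: rs) 1 0 (by norm_num)).1 t hs
      rw [show ((1 : Int) - 0) = 1 by norm_num] at hb
      have hsb : bStep (0, none) c = (1, some c) := by simp [bStep]
      have hfirst : (List.foldl bStep (0, some c) t).1
          = (List.foldl bStep (0, (none : Option Char)) t).1 := by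
        cases t with
        | nil => rfl
        | cons a b => rw [bFold_zero (a :: b) (some c) none (by simp)]
      rw [List.foldl_cons, hsb, hb, hfirst]

-- ===== VERDICT (by name: the statement is the Claim_ definition above) =====
theorem solution_spec : Claim_equal_solution := by
  unfold Claim_equal_solution
  intro s _
  unfold Spec_solution
  by_cases h : aLoop1 s.toList = []
  · have hd := (loop1_empty_iff_balanced s.toList).mp h
    simp [solution, solution_alt, h, hd, aLoop2]
  · have hd : (s.toList.foldl bStep (0, none)).1 ≠ 0 :=
      fun hc => h ((loop1_empty_iff_balanced _).mpr hc)
    have hs := slide_aLoop1 s.toList h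
    simp [solution, solution_alt, hd, aLoop2, hs, h]
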